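-- pv_equiv track=rewrite | github.com/dvolk/arboreta | lib.py | unique_name_in_list
-- ===== SOURCE A (Python) =====
-- def unique_name_in_list(name, xs):
--     if name not in xs:
--         return name
--     else:
--         n = 0
--         while True:
--             composite = "{0}_v{1}".format(name, n)
--             if composite not in xs:
--                 return composite
--             n = n + 1
-- ===== SOURCE B (Python) =====
-- def unique_name_in_list(name, xs):
--     if name not in xs:
--         return name
--     prefix = "{0}_v".format(name)
--     suffixes = set()
--     for s in xs:
--         if s.startswith(prefix):
--             suffixes.add(s[len(prefix):])
--     n = 0
--     while str(n) in suffixes: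
--         n = n + 1
--     return prefix + str(n)
-- ===== Notes on version B (the rewrite author's own statement) =====
-- stated objective: alternative
-- what changed: One pass over xs builds a set of the suffixes following '<name>_v', then probing tests str(n) against that set instead of rebuilding each candidate composite and rescanning the whole list per probe.
import Mathlib
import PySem

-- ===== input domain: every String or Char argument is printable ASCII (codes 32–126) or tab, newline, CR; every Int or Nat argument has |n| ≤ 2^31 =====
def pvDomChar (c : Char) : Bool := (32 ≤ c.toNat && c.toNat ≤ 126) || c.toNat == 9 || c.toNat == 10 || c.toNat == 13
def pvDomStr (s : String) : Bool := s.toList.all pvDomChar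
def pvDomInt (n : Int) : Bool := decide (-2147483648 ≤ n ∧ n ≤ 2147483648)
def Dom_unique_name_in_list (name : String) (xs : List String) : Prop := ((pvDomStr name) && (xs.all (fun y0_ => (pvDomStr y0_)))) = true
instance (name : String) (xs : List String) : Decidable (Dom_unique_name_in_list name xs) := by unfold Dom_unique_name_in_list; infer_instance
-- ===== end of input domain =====

-- B builds a set of the suffixes following "<name>_v" in one pass and probes str(n)
-- against that set, instead of rebuilding each candidate composite and rescanning the
-- whole list for every probe (objective: alternative).

-- ===== PORT A =====
-- Python's unbounded `while True` loop; the fuel (xs.length + 1) only makes the same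
-- computation total: some candidate among the first xs.length + 1 is always free, so
-- the fuel-0 branch is never reached on any input.
def pvLoopA (name : String) (xs : List String) : Nat → Int → String
  | 0, n => name ++ "_v" ++ PySem.Int.toStr n
  | fuel + 1, n =>
      let composite := name ++ "_v" ++ PySem.Int.toStr n
      if xs.contains composite then pvLoopA name xs fuel (n + 1) else composite

def unique_name_in_list (name : String) (xs : List String) : String :=
  if !(xs.contains name) then name
  else pvLoopA name xs (xs.length + 1) 0

-- ===== PORT B =====
def pvSuffixes (pfx : String) (xs : List String) : PySem.Set String :=
  xs.foldl
    (fun acc s =>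
      if PySem.Str.startswith s pfx then
        PySem.Set.add acc (PySem.Str.slice s (some (PySem.Str.len pfx)) none)
      else acc)
    (PySem.Set.ofList [])

-- Python's `while str(n) in suffixes` loop; the fuel only makes it total (see above).
def pvLoopB (suffixes : PySem.Set String) : Nat → Int → Int
  | 0, n => n
  | fuel + 1, n =>
      if suffixes.contains (PySem.Int.toStr n) then pvLoopB suffixes fuel (n + 1) else n

def unique_name_in_list_alt (name : String) (xs : List String) : String :=
  if !(xs.contains name) then name
  else
    let pfx := name ++ "_v"
    let suffixes := pvSuffixes pfx xs
    pfx ++ PySem.Int.toStr (pvLoopB suffixes (suffixes.length + 1) 0)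

-- ===== PRECONDITION & SPEC =====
def Spec_unique_name_in_list (name : String) (xs : List String) (out : String) : Prop := out = unique_name_in_list_alt name xs
instance (name : String) (xs : List String) (out : String) : Decidable (Spec_unique_name_in_list name xs out) := by unfold Spec_unique_name_in_list; infer_instance

-- ===== CLAIM (what is proved, stated in full; the proofs are below) =====
def Claim_equal_unique_name_in_list : Prop := ∀ (name : String) (xs : List String), Dom_unique_name_in_list name xs → Spec_unique_name_in_list name xs (unique_name_in_list name xs)

-- ===== LEMMAS AND PROOFS =====

-- generic counting loop: first n' ≥ n (within fuel) with p n' = false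
def pvGen (p : Int → Bool) : Nat → Int → Int
  | 0, n => n
  | fuel + 1, n => if p n then pvGen p fuel (n + 1) else n

theorem pvLoopA_eq_gen (name : String) (xs : List String) :
    ∀ (fuel : Nat) (n : Int),
      pvLoopA name xs fuel n =
        name ++ "_v" ++ PySem.Int.toStr
          (pvGen (fun m => xs.contains (name ++ "_v" ++ PySem.Int.toStr m)) fuel n) := by
  intro fuel
  induction fuel with
  | zero => intro n; rfl
  | succ f ih =>
      intro n
      simp only [pvLoopA, pvGen]
      by_cases h : name ++ "_v" ++ PySem.Int.toStr n ∈ xs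
      · simp [h, ih]
      · simp [h]

theorem pvLoopB_eq_gen (S : PySem.Set String) :
    ∀ (fuel : Nat) (n : Int),
      pvLoopB S fuel n = pvGen (fun m => S.contains (PySem.Int.toStr m)) fuel n := by
  intro fuel
  induction fuel with
  | zero => intro n; rfl
  | succ f ih =>
      intro n
      simp only [pvLoopB, pvGen]
      by_cases h : PySem.Int.toStr n ∈ S
      · simp [h, ih]
      · simp [h]

theorem pvGen_eq_of_exists (p : Int → Bool) :
    ∀ (f1 f2 : Nat) (n : Int),
      (∃ k : Nat, k < f1 ∧ p (n + k) = false) →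
      (∃ k : Nat, k < f2 ∧ p (n + k) = false) →
      pvGen p f1 n = pvGen p f2 n := by
  intro f1
  induction f1 with
  | zero => intro f2 n h1 _; obtain ⟨k, hk, _⟩ := h1; omega
  | succ f ih =>
      intro f2 n h1 h2
      cases f2 with
      | zero => obtain ⟨k, hk, _⟩ := h2; omega
      | succ f2' =>
          simp only [pvGen]
          by_cases hp : p n
          · simp only [hp, if_true]
            apply ih
            · obtain ⟨k, hk, hv⟩ := h1
              cases k with
              | zero => simp at hv; rw [hv] at hp; simp at hp
              | succ k' =>
                  exact ⟨k', by omega, by rw [show n + 1 + (k' : Int) = n + ((k' + 1 : Nat) : Int) by push_cast; ring]; exact hv⟩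
            · obtain ⟨k, hk, hv⟩ := h2
              cases k with
              | zero => simp at hv; rw [hv] at hp; simp at hp
              | succ k' =>
                  exact ⟨k', by omega, by rw [show n + 1 + (k' : Int) = n + ((k' + 1 : Nat) : Int) by push_cast; ring]; exact hv⟩
          · simp [hp]

-- a decimal reader, left inverse of Nat.toDigits 10
def pvDec (cs : List Char) : Nat := cs.foldl (fun a c => 10 * a + (c.toNat - 48)) 0

theorem pvDigitChar_val (r : Nat) (h : r < 10) : (Nat.digitChar r).toNat - 48 = r := by
  interval_cases r <;> decide

theorem pvDec_toDigitsCore :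
    ∀ (f n : Nat) (ds : List Char), n < 10 ^ f →
      List.foldl (fun a c => 10 * a + (c.toNat - 48)) 0 (Nat.toDigitsCore 10 f n ds) =
      List.foldl (fun a c => 10 * a + (c.toNat - 48)) n ds := by
  intro f
  induction f with
  | zero =>
      intro n ds h
      have : n = 0 := by simpa using h
      subst this
      rfl
  | succ f ih =>
      intro n ds h
      simp only [Nat.toDigitsCore]
      by_cases h0 : n / 10 = 0
      · simp only [h0, if_true]
        have hn : n < 10 := by omega
        simp only [List.foldl_cons, pvDigitChar_val (n % 10) (by omega)]
        have : 10 * 0 + n % 10 = n := by omega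
        rw [this]
      · simp only [h0, if_false]
        have hlt : n / 10 < 10 ^ f := by
          rw [pow_succ] at h
          exact Nat.div_lt_of_lt_mul (by omega)
        rw [ih (n / 10) _ hlt]
        simp only [List.foldl_cons, pvDigitChar_val (n % 10) (by omega)]
        congr 1
        omega

theorem pvDec_toChars (k : Nat) : pvDec (PySem.Int.toChars (k : Int)) = k := by
  have hk : ¬ ((k : Int) < 0) := by omega
  simp only [PySem.Int.toChars, hk, if_false, Int.toNat_natCast]
  unfold Nat.toDigits pvDec
  rw [pvDec_toDigitsCore (k + 1) k [] (by
    calc k < 10 ^ k := Nat.lt_pow_self (by norm_num)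
    _ ≤ 10 ^ (k + 1) := Nat.pow_le_pow_right (by norm_num) (by omega))]
  rfl

theorem pvToStr_nat_inj (a b : Nat) (h : PySem.Int.toStr (a : Int) = PySem.Int.toStr (b : Int)) : a = b := by
  have h2 : PySem.Int.toChars (a : Int) = PySem.Int.toChars (b : Int) := by
    rw [← PySem.Int.toList_toStr, ← PySem.Int.toList_toStr, h]
  have := congrArg pvDec h2
  rwa [pvDec_toChars, pvDec_toChars] at this

-- for any injective stream of candidate strings, some candidate among the
-- first ys.length + 1 is not in ys
theorem pvExists_free (g : Nat → String) (hg : Function.Injective g) (ys : List String) :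
    ∃ k : Nat, k < ys.length + 1 ∧ ys.contains (g k) = false := by
  by_contra hcon
  have hall : ∀ k, k < ys.length + 1 → g k ∈ ys := by
    intro k hk
    cases hc : ys.contains (g k) with
    | true => exact List.contains_iff_mem.mp hc
    | false => exact absurd ⟨k, hk, hc⟩ hcon
  have hsub : (List.range (ys.length + 1)).map g ⊆ ys := by
    intro x hx
    obtain ⟨k, hk, rfl⟩ := List.mem_map.mp hx
    exact hall k (List.mem_range.mp hk)
  have hnd : ((List.range (ys.length + 1)).map g).Nodup :=
    (List.nodup_range).map hg
  have := (hnd.subperm hsub).length_le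
  simp at this

-- the strip characterisation: s startswith pfx with remainder t  ↔  s = pfx ++ t
theorem pvStrip_iff (pfx s t : String) :
    (PySem.Str.startswith s pfx = true ∧
      PySem.Str.slice s (some (PySem.Str.len pfx)) none = t) ↔ s = pfx ++ t := by
  constructor
  · rintro ⟨h1, h2⟩
    rw [PySem.Str.startswith_eq, PySem.Chars.startswith_iff] at h1
    obtain ⟨u, hu⟩ := h1
    apply String.toList_inj.mp
    have h3 := congrArg String.toList h2
    rw [PySem.Str.toList_slice, PySem.Chars.slice_eq_listSlice, PySem.Str.len_eq,
      PySem.List.slice_from_natCast, ← hu, List.drop_left] at h3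
    rw [String.toList_append, ← hu, h3]
  · rintro rfl
    constructor
    · rw [PySem.Str.startswith_eq, PySem.Chars.startswith_iff]
      exact ⟨t.toList, by rw [String.toList_append]⟩
    · apply String.toList_inj.mp
      rw [PySem.Str.toList_slice, PySem.Chars.slice_eq_listSlice, PySem.Str.len_eq,
        PySem.List.slice_from_natCast, String.toList_append, List.drop_left]

theorem pvMem_suffixes_aux (pfx : String) (xs : List String) :
    ∀ (acc : PySem.Set String) (t : String),
      (t ∈ xs.foldl
        (fun acc s =>
          if PySem.Str.startswith s pfx then
            PySem.Set.add acc (PySem.Str.slice s (some (PySem.Str.len pfx)) none)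
          else acc) acc) ↔ (t ∈ acc ∨ (pfx ++ t) ∈ xs) := by
  induction xs with
  | nil => intro acc t; simp
  | cons s xs ih =>
      intro acc t
      simp only [List.foldl_cons, List.mem_cons]
      rw [ih]
      by_cases hs : s = pfx ++ t
      · subst hs
        have h := (pvStrip_iff pfx (pfx ++ t) t).mpr rfl
        rw [h.1]
        simp only [if_true]
        rw [PySem.Set.mem_add]
        constructor
        · rintro (⟨h'|h'⟩|h') <;> tauto
        · rintro (h'|h'|h') <;> tauto
      · by_cases hsw : PySem.Str.startswith s pfx = true
        · simp only [hsw, if_true]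
          rw [PySem.Set.mem_add]
          have hne : PySem.Str.slice s (some (PySem.Str.len pfx)) none ≠ t := by
            intro heq
            exact hs ((pvStrip_iff pfx s t).mp ⟨hsw, heq⟩)
          constructor
          · rintro (⟨h'|h'⟩|h')
            · tauto
            · exact absurd h'.symm (by simpa using hne)
            · tauto
          · rintro (h'|h'|h')
            · tauto
            · exact absurd h'.symm hs
            · tauto
        · simp only [Bool.not_eq_true] at hsw
          simp only [hsw, Bool.false_eq_true, if_false]
          constructor
          · rintro (h'|h') <;> tauto
          · rintro (h'|h'|h')
            · tauto
            · exact absurd h'.symm hs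
            · tauto

theorem pvMem_suffixes (pfx : String) (xs : List String) (t : String) :
    (pvSuffixes pfx xs).contains t = xs.contains (pfx ++ t) := by
  have h := pvMem_suffixes_aux pfx xs (PySem.Set.ofList []) t
  have h0 : ¬ t ∈ (PySem.Set.ofList ([] : List String)) := by
    simp [PySem.Set.ofList]
  unfold pvSuffixes
  rw [Bool.eq_iff_iff]
  constructor
  · intro hc
    rcases h.mp (List.contains_iff_mem.mp hc) with h' | h'
    · exact absurd h' h0
    · exact List.contains_iff_mem.mpr h'
  · intro hc
    exact List.contains_iff_mem.mpr (h.mpr (Or.inr (List.contains_iff_mem.mp hc)))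

theorem pvCompA_inj (name : String) :
    Function.Injective (fun k : Nat => name ++ "_v" ++ PySem.Int.toStr (k : Int)) := by
  intro a b h
  simp only at h
  have h2 := congrArg String.toList h
  simp only [String.toList_append] at h2
  exact pvToStr_nat_inj a b (String.toList_inj.mp (List.append_cancel_left h2))

-- ===== VERDICT (by name: the statement is the Claim_ definition above) =====
theorem unique_name_in_list_spec : Claim_equal_unique_name_in_list := by
  intro name xs _
  unfold Spec_unique_name_in_list unique_name_in_list unique_name_in_list_alt
  by_cases hin : name ∈ xs
  · simp only [List.contains_iff_mem.mpr hin, Bool.not_true, Bool.false_eq_true, if_false]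
    set pfx := name ++ "_v" with hpfx
    set S := pvSuffixes pfx xs with hS
    set p : Int → Bool := fun m => xs.contains (name ++ "_v" ++ PySem.Int.toStr m) with hp
    have hpeq : (fun m => S.contains (PySem.Int.toStr m)) = p := by
      funext m
      rw [hS, pvMem_suffixes, hp]
    rw [pvLoopA_eq_gen, pvLoopB_eq_gen, hpeq]
    have hA : ∃ k : Nat, k < xs.length + 1 ∧ p (0 + (k : Int)) = false := by
      obtain ⟨k, hk, hv⟩ := pvExists_free _ (pvCompA_inj name) xs
      exact ⟨k, hk, by rw [zero_add]; exact hv⟩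
    have hB : ∃ k : Nat, k < S.length + 1 ∧ p (0 + (k : Int)) = false := by
      have hinj : Function.Injective (fun k : Nat => PySem.Int.toStr (k : Int)) := by
        intro a b h; exact pvToStr_nat_inj a b h
      obtain ⟨k, hk, hv⟩ := pvExists_free _ hinj S
      refine ⟨k, hk, ?_⟩
      rw [zero_add]
      show xs.contains (pfx ++ PySem.Int.toStr (k : Int)) = false
      rw [← pvMem_suffixes pfx xs]
      rw [hS] at hv
      exact hv
    rw [pvGen_eq_of_exists p (xs.length + 1) (S.length + 1) 0 hA hB]
  · have hc : xs.contains name = false := by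
      cases hcc : xs.contains name with
      | false => rfl
      | true => exact absurd (List.contains_iff_mem.mp hcc) hin
    simp [hin]
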